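-- pv_equiv track=rewrite | github.com/yazinsai/offline-tarteel | scripts/validate_phoneme_onnx_modal.py | _join_phonemes
-- ===== SOURCE A (Python) =====
-- def _join_phonemes(raw_tokens: list[str]) -> str:
--     """Join phoneme tokens into word representation (same as web app CTC decoder)."""
--     words = []
--     current = []
--     for tok in raw_tokens:
--         if tok == "|":
--             if current:
--                 words.append("".join(current))
--             current = []
--         else:
--             current.append(tok)
--     if current:
--         words.append("".join(current))
--     return " ".join(words)
-- ===== SOURCE B (Python) =====
-- def _join_phonemes(raw_tokens: list[str]) -> str:
--     """Join phoneme tokens into word representation (same as web app CTC decoder)."""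
--     words = []
--     i, n = 0, len(raw_tokens)
--     while i < n:
--         if raw_tokens[i] == "|":
--             i += 1
--             continue
--         j = i
--         while j < n and raw_tokens[j] != "|":
--             j += 1
--         words.append("".join(raw_tokens[i:j]))
--         i = j
--     return " ".join(words)
-- ===== Notes on version B (the rewrite author's own statement) =====
-- stated objective: alternative
-- what changed: Replaces A's one-token-at-a-time buffer state machine with run detection: two index pointers scan each maximal run of non-'|' tokens and join the whole slice at once, with no current-buffer state carried across iterations.
import Mathlib
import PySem

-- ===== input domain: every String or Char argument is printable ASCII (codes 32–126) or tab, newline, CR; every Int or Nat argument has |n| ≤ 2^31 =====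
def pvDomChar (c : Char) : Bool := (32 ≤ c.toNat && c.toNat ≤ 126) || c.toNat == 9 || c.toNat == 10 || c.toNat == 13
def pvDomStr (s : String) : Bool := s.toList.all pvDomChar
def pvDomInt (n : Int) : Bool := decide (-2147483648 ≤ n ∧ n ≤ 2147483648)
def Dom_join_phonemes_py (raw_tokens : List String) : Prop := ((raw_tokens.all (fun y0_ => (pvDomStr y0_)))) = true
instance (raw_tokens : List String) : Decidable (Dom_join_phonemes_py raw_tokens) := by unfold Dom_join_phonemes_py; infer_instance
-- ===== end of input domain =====

-- B replaces A's token-by-token buffer state machine with two-pointer run detection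
-- (find each maximal run of non-"|" tokens and join the slice at once): alternative algorithm, same cost.


-- ===== PORT A =====
-- A: fold over tokens with state (words, current); on "|" flush current (if nonempty), else append token.
def join_phonemes_py (raw_tokens : List String) : String :=
  let st := raw_tokens.foldl
    (fun (s : List String × List String) tok =>
      if tok = "|" then
        (if s.2 ≠ [] then s.1 ++ [PySem.Str.join "" s.2] else s.1, [])
      else
        (s.1, s.2 ++ [tok]))
    ([], [])
  let words := if st.2 ≠ [] then st.1 ++ [PySem.Str.join "" st.2] else st.1
  PySem.Str.join " " words

-- ===== PORT B =====
-- B's word scan: skip "|" separators; otherwise take the maximal run of non-"|" tokens as one word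
-- (raw_tokens[i:j] in Source B = t :: takeWhile here) and continue after it (dropWhile).
def pvRuns (l : List String) : List (List String) :=
  match l with
  | [] => []
  | t :: ts =>
    if t = "|" then pvRuns ts
    else (t :: ts.takeWhile (fun x => ¬ x = "|")) :: pvRuns (ts.dropWhile (fun x => ¬ x = "|"))
termination_by l.length
decreasing_by
  · simp
  · exact Nat.lt_succ_of_le (ts.length_dropWhile_le _)

def join_phonemes_py_alt (raw_tokens : List String) : String :=
  PySem.Str.join " " ((pvRuns raw_tokens).map (PySem.Str.join ""))

-- ===== PRECONDITION & SPEC =====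
def Spec_join_phonemes_py (raw_tokens : List String) (out : String) : Prop := out = join_phonemes_py_alt raw_tokens
instance (raw_tokens : List String) (out : String) : Decidable (Spec_join_phonemes_py raw_tokens out) := by unfold Spec_join_phonemes_py; infer_instance

-- ===== CLAIM (what is proved, stated in full; the proofs are below) =====
def Claim_equal_join_phonemes_py : Prop := ∀ (raw_tokens : List String), Dom_join_phonemes_py raw_tokens → Spec_join_phonemes_py raw_tokens (join_phonemes_py raw_tokens)

-- ===== LEMMAS AND PROOFS =====

-- A's accumulator semantics: runs of the remaining list, with the pending buffer c prepended.
def pvRunsAcc (c : List String) (l : List String) : List (List String) :=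
  match l with
  | [] => if c = [] then [] else [c]
  | t :: ts =>
    if t = "|" then (if c = [] then pvRunsAcc [] ts else c :: pvRunsAcc [] ts)
    else pvRunsAcc (c ++ [t]) ts

lemma pvRunsAcc_spec (l : List String) :
    (∀ c, c ≠ [] → pvRunsAcc c l =
      (c ++ l.takeWhile (fun x => ¬ x = "|")) :: pvRuns (l.dropWhile (fun x => ¬ x = "|")))
    ∧ pvRunsAcc [] l = pvRuns l := by
  induction l with
  | nil => simp [pvRunsAcc, pvRuns]
  | cons t ts ih =>
    by_cases h : t = "|"
    · subst h
      refine ⟨fun c hc => ?_, ?_⟩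
      · simp [pvRunsAcc, hc, ih.2, pvRuns]
      · simp [pvRunsAcc, ih.2, pvRuns]
    · refine ⟨fun c hc => ?_, ?_⟩
      · have := ih.1 (c ++ [t]) (by simp)
        simp [pvRunsAcc, h, this]
      · have := ih.1 [t] (by simp)
        simp [pvRunsAcc, h, this, pvRuns]

def pvStepA (s : List String × List String) (tok : String) : List String × List String :=
  if tok = "|" then
    (if s.2 ≠ [] then s.1 ++ [PySem.Str.join "" s.2] else s.1, [])
  else
    (s.1, s.2 ++ [tok])

def pvFinA (st : List String × List String) : List String :=
  if st.2 ≠ [] then st.1 ++ [PySem.Str.join "" st.2] else st.1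

-- The fold of A, finalized, produces w ++ the runs seeded with buffer c.
lemma foldA_spec (l : List String) : ∀ (w c : List String),
    pvFinA (l.foldl pvStepA (w, c)) = w ++ (pvRunsAcc c l).map (PySem.Str.join "") := by
  induction l with
  | nil =>
    intro w c
    by_cases hc : c = [] <;> simp [pvFinA, pvRunsAcc, hc]
  | cons t ts ih =>
    intro w c
    rw [List.foldl_cons]
    by_cases h : t = "|"
    · by_cases hc : c = [] <;>
        simp [pvStepA, h, hc, ih, pvRunsAcc]
    · simp [pvStepA, h, ih, pvRunsAcc]

-- ===== VERDICT (by name: the statement is the Claim_ definition above) =====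
theorem join_phonemes_py_spec : Claim_equal_join_phonemes_py := by
  intro raw_tokens _
  show join_phonemes_py raw_tokens = join_phonemes_py_alt raw_tokens
  show PySem.Str.join " " (pvFinA (raw_tokens.foldl pvStepA ([], []))) = _
  rw [foldA_spec raw_tokens [] [], (pvRunsAcc_spec raw_tokens).2]
  rfl
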